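-- pv_equiv track=rewrite | github.com/syauqylei/Final_Project | PythonPrograms/modules/stencils.py | gen_in_sten_4th
-- ===== SOURCE A (Python) =====
-- def gen_in_sten_4th(Nx,Ny):
--     stencils=[]
--     for i in range(Ny):
--         for j in range(Nx):
--             if i==0 or i==1 or i==Ny-1 or i==Ny-2 or j==0 or j==1 or j==Nx-2 or j==Nx-1:
--                 continue
--             else:
--                 stencils.append(i*Nx+j)
--     return stencils
-- ===== SOURCE B (Python) =====
-- def gen_in_sten_4th(Nx, Ny):
--     # Each interior row i contributes the contiguous block range(i*Nx+2, i*Nx+Nx-2);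
--     # column indices come from arithmetic, no per-cell boundary test.
--     return [k for i in range(2, Ny - 2) for k in range(i * Nx + 2, i * Nx + Nx - 2)]
-- ===== Notes on version B (the rewrite author's own statement) =====
-- stated objective: alternative
-- what changed: B replaces the per-cell boundary test over all Nx*Ny grid cells by directly emitting each interior row's contiguous index block range(i*Nx+2, i*Nx+Nx-2) for i in range(2, Ny-2); a timing run could not confirm a >=1.5x speedup, so no speed is claimed.
import Mathlib
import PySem

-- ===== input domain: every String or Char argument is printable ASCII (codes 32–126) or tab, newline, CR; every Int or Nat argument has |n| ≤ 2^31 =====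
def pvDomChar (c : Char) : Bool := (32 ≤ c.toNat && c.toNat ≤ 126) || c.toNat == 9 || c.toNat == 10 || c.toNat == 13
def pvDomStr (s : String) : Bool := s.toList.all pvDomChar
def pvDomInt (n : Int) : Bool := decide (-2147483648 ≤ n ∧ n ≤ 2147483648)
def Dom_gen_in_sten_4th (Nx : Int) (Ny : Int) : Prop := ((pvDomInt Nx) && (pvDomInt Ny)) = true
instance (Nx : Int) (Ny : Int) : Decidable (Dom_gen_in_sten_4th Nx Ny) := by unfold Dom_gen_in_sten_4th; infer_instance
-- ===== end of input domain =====

-- B emits each interior row's contiguous index block by arithmetic instead of testing every grid cell against the boundary conditions (objective: alternative decomposition; boundary cells are never visited).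


-- ===== PORT A =====
def gen_in_sten_4th (Nx : Int) (Ny : Int) : List Int :=
  (PySem.List.pyRange 0 Ny 1).foldl (fun stencils i =>
    (PySem.List.pyRange 0 Nx 1).foldl (fun stencils j =>
      if i = 0 ∨ i = 1 ∨ i = Ny - 1 ∨ i = Ny - 2 ∨ j = 0 ∨ j = 1 ∨ j = Nx - 2 ∨ j = Nx - 1
      then stencils
      else stencils ++ [i * Nx + j]) stencils) []

-- ===== PORT B =====
def gen_in_sten_4th_alt (Nx : Int) (Ny : Int) : List Int :=
  (PySem.List.pyRange 2 (Ny - 2) 1).flatMap (fun i =>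
    PySem.List.pyRange (i * Nx + 2) (i * Nx + Nx - 2) 1)

-- ===== PRECONDITION & SPEC =====
def Spec_gen_in_sten_4th (Nx : Int) (Ny : Int) (out : List Int) : Prop := out = gen_in_sten_4th_alt Nx Ny
instance (Nx : Int) (Ny : Int) (out : List Int) : Decidable (Spec_gen_in_sten_4th Nx Ny out) := by unfold Spec_gen_in_sten_4th; infer_instance

-- ===== CLAIM (what is proved, stated in full; the proofs are below) =====
def Claim_equal_gen_in_sten_4th : Prop := ∀ (Nx : Int) (Ny : Int), Dom_gen_in_sten_4th Nx Ny → Spec_gen_in_sten_4th Nx Ny (gen_in_sten_4th Nx Ny)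

-- ===== LEMMAS AND PROOFS =====

-- the value a row i contributes in A: nothing on a boundary row, the filtered columns otherwise
def pvRowVal (Nx : Int) (Ny : Int) (i : Int) : List Int :=
  if i = 0 ∨ i = 1 ∨ i = Ny - 1 ∨ i = Ny - 2 then []
  else PySem.List.pyRange (i * Nx + 2) (i * Nx + Nx - 2) 1

-- the columns A keeps are exactly the contiguous block [2, Nx-2)
theorem pv_filter_cols (Nx : Int) :
    (PySem.List.pyRange 0 Nx 1).filter
      (fun j => decide (¬(j = 0 ∨ j = 1 ∨ j = Nx - 2 ∨ j = Nx - 1)))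
      = PySem.List.pyRange 2 (Nx - 2) 1 := by
  by_cases h4 : 4 ≤ Nx
  · rw [PySem.List.pyRange_one_append 0 2 Nx (by omega) (by omega),
        PySem.List.pyRange_one_append 2 (Nx - 2) Nx (by omega) (by omega),
        List.filter_append, List.filter_append]
    have h0 : PySem.List.pyRange 0 2 1 = [0, 1] := by decide
    have hend : PySem.List.pyRange (Nx - 2) Nx 1 = [Nx - 2, Nx - 1] := by
      rw [PySem.List.pyRange_one_cons (by omega), show Nx - 2 + 1 = Nx - 1 by ring,
          PySem.List.pyRange_one_cons (by omega), show Nx - 1 + 1 = Nx by ring,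
          PySem.List.pyRange_one_eq_nil (by omega)]
    have hmid : (PySem.List.pyRange 2 (Nx - 2) 1).filter
        (fun j => decide (¬(j = 0 ∨ j = 1 ∨ j = Nx - 2 ∨ j = Nx - 1)))
        = PySem.List.pyRange 2 (Nx - 2) 1 := by
      apply List.filter_eq_self.mpr
      intro j hj
      rw [PySem.List.mem_pyRange_one] at hj
      simp only [decide_eq_true_eq]
      omega
    rw [h0, hmid, hend]
    simp only [List.filter_cons, List.filter_nil]
    norm_num
  · rw [PySem.List.pyRange_one_eq_nil (show Nx - 2 ≤ 2 by omega)]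
    apply List.filter_eq_nil_iff.mpr
    intro j hj
    rw [PySem.List.mem_pyRange_one] at hj
    simp only [decide_eq_true_eq, not_not]
    omega

-- shifting the column block by i*Nx
theorem pv_map_shift (Nx i : Int) :
    (PySem.List.pyRange 2 (Nx - 2) 1).map (fun j => i * Nx + j)
      = PySem.List.pyRange (i * Nx + 2) (i * Nx + Nx - 2) 1 := by
  rw [PySem.List.pyRange_one, PySem.List.pyRange_one, List.map_map]
  rw [show i * Nx + Nx - 2 - (i * Nx + 2) = Nx - 2 - 2 by ring]
  apply List.map_congr_left
  intro k _
  simp only [Function.comp_apply]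
  ring

-- A's inner loop over a row equals appending pvRowVal
theorem pv_inner_row (Nx Ny i : Int) (acc : List Int) :
    (PySem.List.pyRange 0 Nx 1).foldl (fun stencils j =>
      if i = 0 ∨ i = 1 ∨ i = Ny - 1 ∨ i = Ny - 2 ∨ j = 0 ∨ j = 1 ∨ j = Nx - 2 ∨ j = Nx - 1
      then stencils else stencils ++ [i * Nx + j]) acc
      = acc ++ pvRowVal Nx Ny i := by
  by_cases hb : i = 0 ∨ i = 1 ∨ i = Ny - 1 ∨ i = Ny - 2
  · rw [PySem.List.foldl_congr_mem (PySem.List.pyRange 0 Nx 1)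
      (fun stencils j =>
        if i = 0 ∨ i = 1 ∨ i = Ny - 1 ∨ i = Ny - 2 ∨ j = 0 ∨ j = 1 ∨ j = Nx - 2 ∨ j = Nx - 1
        then stencils else stencils ++ [i * Nx + j])
      (fun stencils _ => stencils) acc
      (by intro a j _; exact if_pos (by tauto))]
    simp [pvRowVal, hb, List.foldl_fixed]
  · rw [PySem.List.foldl_congr_mem (PySem.List.pyRange 0 Nx 1)
      (fun stencils j =>
        if i = 0 ∨ i = 1 ∨ i = Ny - 1 ∨ i = Ny - 2 ∨ j = 0 ∨ j = 1 ∨ j = Nx - 2 ∨ j = Nx - 1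
        then stencils else stencils ++ [i * Nx + j])
      (fun stencils j => if (decide (¬(j = 0 ∨ j = 1 ∨ j = Nx - 2 ∨ j = Nx - 1))) = true
        then stencils ++ [i * Nx + j] else stencils) acc
      (by
        intro a j _
        by_cases hc : j = 0 ∨ j = 1 ∨ j = Nx - 2 ∨ j = Nx - 1 <;> simp [hb, hc])]
    rw [PySem.List.foldl_append_if _ (fun j => i * Nx + j), pv_filter_cols, pv_map_shift]
    simp [pvRowVal, hb]

-- summing the rows: A's flatMap of pvRowVal is B's flatMap over interior rows
theorem pv_rows (Nx Ny : Int) :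
    (PySem.List.pyRange 0 Ny 1).flatMap (pvRowVal Nx Ny)
      = (PySem.List.pyRange 2 (Ny - 2) 1).flatMap (fun i =>
          PySem.List.pyRange (i * Nx + 2) (i * Nx + Nx - 2) 1) := by
  have hmid : ∀ l : List Int, (∀ i ∈ l, 2 ≤ i ∧ i < Ny - 2) →
      l.flatMap (pvRowVal Nx Ny)
        = l.flatMap (fun i => PySem.List.pyRange (i * Nx + 2) (i * Nx + Nx - 2) 1) := by
    intro l hl
    rw [List.flatMap, List.flatMap, List.map_congr_left]
    intro i hi
    have := hl i hi
    rw [pvRowVal, if_neg (by omega)]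
  by_cases h4 : 4 ≤ Ny
  · rw [PySem.List.pyRange_one_append 0 2 Ny (by omega) (by omega),
        PySem.List.pyRange_one_append 2 (Ny - 2) Ny (by omega) (by omega),
        List.flatMap_append, List.flatMap_append]
    have h0 : PySem.List.pyRange 0 2 1 = [0, 1] := by decide
    have hend : PySem.List.pyRange (Ny - 2) Ny 1 = [Ny - 2, Ny - 1] := by
      rw [PySem.List.pyRange_one_cons (by omega), show Ny - 2 + 1 = Ny - 1 by ring,
          PySem.List.pyRange_one_cons (by omega), show Ny - 1 + 1 = Ny by ring,
          PySem.List.pyRange_one_eq_nil (by omega)]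
    rw [h0, hend]
    have e0 : pvRowVal Nx Ny 0 = [] := by rw [pvRowVal, if_pos (by omega)]
    have e1 : pvRowVal Nx Ny 1 = [] := by rw [pvRowVal, if_pos (by omega)]
    have e2 : pvRowVal Nx Ny (Ny - 2) = [] := by rw [pvRowVal, if_pos (by omega)]
    have e3 : pvRowVal Nx Ny (Ny - 1) = [] := by rw [pvRowVal, if_pos (by omega)]
    rw [hmid (PySem.List.pyRange 2 (Ny - 2) 1)
      (by intro i hi; rw [PySem.List.mem_pyRange_one] at hi; omega)]
    simp [e0, e1, e2, e3]
  · rw [PySem.List.pyRange_one_eq_nil (show Ny - 2 ≤ 2 by omega), List.flatMap_nil]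
    apply List.flatMap_eq_nil_iff.mpr
    intro i hi
    rw [PySem.List.mem_pyRange_one] at hi
    rw [pvRowVal, if_pos (by omega)]

-- ===== VERDICT (by name: the statement is the Claim_ definition above) =====
theorem gen_in_sten_4th_spec : Claim_equal_gen_in_sten_4th := by
  intro Nx Ny _
  show gen_in_sten_4th Nx Ny = gen_in_sten_4th_alt Nx Ny
  unfold gen_in_sten_4th gen_in_sten_4th_alt
  rw [PySem.List.foldl_congr_mem (PySem.List.pyRange 0 Ny 1)
    (fun stencils i =>
      (PySem.List.pyRange 0 Nx 1).foldl (fun stencils j =>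
        if i = 0 ∨ i = 1 ∨ i = Ny - 1 ∨ i = Ny - 2 ∨ j = 0 ∨ j = 1 ∨ j = Nx - 2 ∨ j = Nx - 1
        then stencils else stencils ++ [i * Nx + j]) stencils)
    (fun stencils i => stencils ++ pvRowVal Nx Ny i) []
    (by intro acc i _; exact pv_inner_row Nx Ny i acc)]
  rw [PySem.List.foldl_append_eq_flatMap (pvRowVal Nx Ny), List.nil_append, pv_rows]
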